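-- pv_equiv track=rewrite | github.com/mmkafker/hardspheres | edmd_11-10-23.py | GenCell2Particle
-- ===== SOURCE A (Python) =====
-- def GenCell2Particle(particle2cell,num,ncells):
--     cell2particle = {};
--
--     for i in range(ncells):
--         for j in range(ncells):
--             cell2particle[(i,j)] = []
--
--     for i in range(num):
--         cell2particle[tuple(particle2cell[i])].append(i)
--
--     return cell2particle
-- ===== SOURCE B (Python) =====
-- def GenCell2Particle(particle2cell, num, ncells):
--     # For each cell of the grid, select its particles directly by filtering
--     # the particle range; no mutable bucket dict is built at all.
--     return {(i, j): [k for k in range(num) if tuple(particle2cell[k]) == (i, j)]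
--             for i in range(ncells) for j in range(ncells)}
-- ===== Notes on version B (the rewrite author's own statement) =====
-- stated objective: simpler
-- what changed: A builds a mutable dict of empty buckets and appends each particle into its cell; B builds no buckets at all: a single dict comprehension computes each cell's list by filtering the particle range for that cell (per-cell selection instead of per-particle insertion).
import Mathlib
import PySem

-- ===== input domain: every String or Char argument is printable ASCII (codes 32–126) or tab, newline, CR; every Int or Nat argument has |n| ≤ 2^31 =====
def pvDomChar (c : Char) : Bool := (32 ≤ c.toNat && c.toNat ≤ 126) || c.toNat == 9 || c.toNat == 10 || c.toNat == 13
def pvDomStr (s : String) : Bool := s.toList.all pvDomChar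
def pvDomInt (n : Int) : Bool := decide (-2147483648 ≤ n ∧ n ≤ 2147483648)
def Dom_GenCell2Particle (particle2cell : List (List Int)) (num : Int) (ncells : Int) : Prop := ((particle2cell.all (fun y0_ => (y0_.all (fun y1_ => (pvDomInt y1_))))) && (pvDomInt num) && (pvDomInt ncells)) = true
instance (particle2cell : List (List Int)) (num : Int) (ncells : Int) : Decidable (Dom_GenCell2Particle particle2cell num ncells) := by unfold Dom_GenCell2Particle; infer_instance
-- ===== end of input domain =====

-- B builds no bucket dict at all: one comprehension computes each cell's list by filtering the
-- particle range for that cell (per-cell selection instead of A's per-particle insertion); simpler.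

-- ===== PORT A =====
def GenCell2Particle (particle2cell : List (List Int)) (num : Int) (ncells : Int) : List (Int × Int × List Int) :=
  let init : PySem.Dict (Int × Int) (List Int) :=
    (PySem.List.pyRange 0 ncells 1).foldl (fun d i =>
      (PySem.List.pyRange 0 ncells 1).foldl (fun d j => d.insert (i, j) ([] : List Int)) d)
      PySem.Dict.empty
  let final : PySem.Dict (Int × Int) (List Int) :=
    (PySem.List.pyRange 0 num 1).foldl (fun d i =>
      match PySem.List.pyGet? particle2cell i with
      | some [a, b] => d.modify (a, b) [] (· ++ [i])
      | _ => d) init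
  -- a missing index (IndexError) or a key not installed above (KeyError) is excluded by Pre_
  final.items.map (fun p => (p.1.1, p.1.2, p.2))

-- ===== PORT B =====
-- tuple(row) == (i, j): true iff the row is exactly the pair (i, j)
def pvRowEq (l : List Int) (i j : Int) : Bool := l == [i, j]

def GenCell2Particle_alt (particle2cell : List (List Int)) (num : Int) (ncells : Int) : List (Int × Int × List Int) :=
  (PySem.List.pyRange 0 ncells 1).flatMap (fun i =>
    (PySem.List.pyRange 0 ncells 1).map (fun j =>
      (i, j, (PySem.List.pyRange 0 num 1).filter (fun k =>
        -- a missing index (IndexError) is excluded by Pre_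
        match PySem.List.pyGet? particle2cell k with
        | some l => pvRowEq l i j
        | none => false))))

-- ===== PRECONDITION & SPEC =====
-- Pre_ = exactly the inputs where A returns: every used index exists (else IndexError) and every
-- used row is a pair of coordinates inside the grid (else A's dict lookup raises KeyError).
def Pre_GenCell2Particle (particle2cell : List (List Int)) (num : Int) (ncells : Int) : Prop :=
  num ≤ (particle2cell.length : Int) ∧
  ∀ l ∈ particle2cell.take num.toNat, l.length = 2 ∧ ∀ x ∈ l, 0 ≤ x ∧ x < ncells
instance (particle2cell : List (List Int)) (num : Int) (ncells : Int) : Decidable (Pre_GenCell2Particle particle2cell num ncells) := by unfold Pre_GenCell2Particle; infer_instance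
def pvWitness_GenCell2Particle : List (List Int) × Int × Int := ([[0, 1], [1, 1], [0, 1]], 3, 2)

def Spec_GenCell2Particle (particle2cell : List (List Int)) (num : Int) (ncells : Int) (out : List (Int × Int × List Int)) : Prop := out = GenCell2Particle_alt particle2cell num ncells
instance (particle2cell : List (List Int)) (num : Int) (ncells : Int) (out : List (Int × Int × List Int)) : Decidable (Spec_GenCell2Particle particle2cell num ncells out) := by unfold Spec_GenCell2Particle; infer_instance

-- ===== CLAIM (what is proved, stated in full; the proofs are below) =====
def Claim_equal_GenCell2Particle : Prop := ∀ (particle2cell : List (List Int)) (num : Int) (ncells : Int), Dom_GenCell2Particle particle2cell num ncells → Pre_GenCell2Particle particle2cell num ncells → Spec_GenCell2Particle particle2cell num ncells (GenCell2Particle particle2cell num ncells)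

-- ===== LEMMAS AND PROOFS =====

-- all grid cells, in A's initialisation order = B's output order
def pvGrid (ncells : Int) : List (Int × Int) :=
  (PySem.List.pyRange 0 ncells 1).flatMap (fun i => (PySem.List.pyRange 0 ncells 1).map (fun j => (i, j)))

-- the cell key A appends under / B compares against for particle i
def pvKey (particle2cell : List (List Int)) (i : Int) : Int × Int :=
  match PySem.List.pyGet? particle2cell i with
  | some [a, b] => (a, b)
  | _ => (0, 0)

theorem pvGrid_nodup (ncells : Int) : (pvGrid ncells).Nodup := by
  have : pvGrid ncells = (PySem.List.pyRange 0 ncells 1).product (PySem.List.pyRange 0 ncells 1) := rfl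
  rw [this]
  exact List.Nodup.product (PySem.List.nodup_pyRange_one _ _) (PySem.List.nodup_pyRange_one _ _)

theorem mem_pvGrid (ncells : Int) (c : Int × Int) :
    c ∈ pvGrid ncells ↔ (0 ≤ c.1 ∧ c.1 < ncells) ∧ (0 ≤ c.2 ∧ c.2 < ncells) := by
  cases c with
  | mk a b =>
    simp [pvGrid, List.mem_flatMap, List.mem_map, PySem.List.mem_pyRange_one]

-- under Pre_, the key of every particle i ∈ range(num) lies in the grid
theorem pvKey_mem (particle2cell : List (List Int)) (num ncells i : Int)
    (hpre : Pre_GenCell2Particle particle2cell num ncells)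
    (hi : i ∈ PySem.List.pyRange 0 num 1) :
    ∃ a b, PySem.List.pyGet? particle2cell i = some [a, b] ∧
      pvKey particle2cell i = (a, b) ∧ (a, b) ∈ pvGrid ncells := by
  obtain ⟨h0, hi'⟩ := (PySem.List.mem_pyRange_one).1 hi
  obtain ⟨hlen, hrow⟩ := hpre
  have hilen : i.toNat < particle2cell.length := by omega
  have hget : PySem.List.pyGet? particle2cell i = some (particle2cell[i.toNat]) :=
    PySem.List.pyGet?_eq_some_getElem particle2cell h0 (by omega)
  have hmem : particle2cell[i.toNat] ∈ particle2cell.take num.toNat := by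
    rw [List.mem_take_iff_getElem]
    exact ⟨i.toNat, by omega, rfl⟩
  obtain ⟨h2, hco⟩ := hrow _ hmem
  obtain ⟨a, b, hab⟩ : ∃ a b, particle2cell[i.toNat] = [a, b] := by
    match h : particle2cell[i.toNat] with
    | [a, b] => exact ⟨a, b, rfl⟩
    | [] | [_] | _ :: _ :: _ :: _ => rw [h] at h2; simp at h2
  refine ⟨a, b, by rw [hget, hab], by simp [pvKey, hget, hab], ?_⟩
  rw [mem_pvGrid]
  constructor
  · exact hco a (by rw [hab]; simp)
  · exact hco b (by rw [hab]; simp)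

-- A's initialisation double loop builds exactly the grid, each cell mapped to []
theorem init_items (ncells : Int) :
    ((PySem.List.pyRange 0 ncells 1).foldl (fun d i =>
      (PySem.List.pyRange 0 ncells 1).foldl (fun d j => d.insert (i, j) ([] : List Int)) d)
      PySem.Dict.empty).items = (pvGrid ncells).map (fun c => (c, ([] : List Int))) := by
  have hflat : ((PySem.List.pyRange 0 ncells 1).foldl (fun d i =>
      (PySem.List.pyRange 0 ncells 1).foldl (fun d j => d.insert (i, j) ([] : List Int)) d)
      PySem.Dict.empty)
      = (pvGrid ncells).foldl (fun d c => d.insert c ([] : List Int)) PySem.Dict.empty := by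
    rw [pvGrid, List.foldl_flatMap]
    simp [List.foldl_map]
  rw [hflat]
  have := PySem.Dict.items_foldl_insert_fresh (l := pvGrid ncells) (k := fun c => c)
    (v := fun _ => ([] : List Int)) (d := PySem.Dict.empty)
    (by intro a _; simp) (by simpa using pvGrid_nodup ncells)
  simpa using this

-- the particle loop of A, under Pre_, is the clean modify-by-pvKey loop
theorem loop_clean (particle2cell : List (List Int)) (num ncells : Int)
    (hpre : Pre_GenCell2Particle particle2cell num ncells)
    (d : PySem.Dict (Int × Int) (List Int)) :
    (PySem.List.pyRange 0 num 1).foldl (fun d i =>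
      match PySem.List.pyGet? particle2cell i with
      | some [a, b] => d.modify (a, b) [] (· ++ [i])
      | _ => d) d
    = ((PySem.List.pyRange 0 num 1).map (fun i => (pvKey particle2cell i, i))).foldl
        (fun d p => d.modify p.1 [] (· ++ [p.2])) d := by
  rw [List.foldl_map]
  apply PySem.List.foldl_congr_mem
  intro acc i hi
  obtain ⟨a, b, hget, hkey, -⟩ := pvKey_mem particle2cell num ncells i hpre hi
  rw [hget, hkey]

-- keys are unchanged by the particle loop: every key touched is already in the grid
theorem final_keys (particle2cell : List (List Int)) (num ncells : Int)
    (hpre : Pre_GenCell2Particle particle2cell num ncells)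
    (d : PySem.Dict (Int × Int) (List Int)) (hk : d.keys = pvGrid ncells) :
    (((PySem.List.pyRange 0 num 1).map (fun i => (pvKey particle2cell i, i))).foldl
        (fun d p => d.modify p.1 [] (· ++ [p.2])) d).keys = pvGrid ncells := by
  rw [PySem.Dict.keys_foldl_modify_key, hk]
  rw [PySem.Set.update_eq_append_filter]
  have : (PySem.Set.ofList (((PySem.List.pyRange 0 num 1).map (fun i => (pvKey particle2cell i, i))).map (·.1))).filter
      (fun y => !(PySem.Set.contains (pvGrid ncells) y)) = [] := by
    rw [List.filter_eq_nil_iff]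
    intro y hy
    have hy' : y ∈ ((PySem.List.pyRange 0 num 1).map (fun i => (pvKey particle2cell i, i))).map (·.1) :=
      (PySem.Set.mem_ofList _ _).1 hy
    simp only [List.mem_map] at hy'
    obtain ⟨p, hp, rfl⟩ := hy'
    obtain ⟨i, hi, rfl⟩ := hp
    obtain ⟨a, b, -, hkey, hmem⟩ := pvKey_mem particle2cell num ncells i hpre hi
    simp only [hkey]
    simpa using hmem
  rw [this, List.append_nil]

-- B's per-cell filter, under Pre_, is the pvKey filter
theorem filter_clean (particle2cell : List (List Int)) (num ncells : Int)
    (hpre : Pre_GenCell2Particle particle2cell num ncells) (c : Int × Int) :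
    (PySem.List.pyRange 0 num 1).filter (fun k =>
        match PySem.List.pyGet? particle2cell k with
        | some l => pvRowEq l c.1 c.2
        | none => false)
    = (PySem.List.pyRange 0 num 1).filter (fun k => pvKey particle2cell k == c) := by
  apply List.filter_congr
  intro k hk
  obtain ⟨a, b, hget, hkey, -⟩ := pvKey_mem particle2cell num ncells k hpre hk
  rw [hget, hkey]
  cases c
  apply Bool.eq_iff_iff.mpr
  simp [pvRowEq, Prod.ext_iff]

theorem GenCell2Particle_spec : Claim_equal_GenCell2Particle := by
  unfold Claim_equal_GenCell2Particle
  intro p2c num ncells _ hpre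
  unfold Spec_GenCell2Particle GenCell2Particle GenCell2Particle_alt
  simp only []
  rw [loop_clean p2c num ncells hpre]
  set L := (PySem.List.pyRange 0 num 1).map (fun i => (pvKey p2c i, i)) with hL
  set init := (PySem.List.pyRange 0 ncells 1).foldl (fun d i =>
      (PySem.List.pyRange 0 ncells 1).foldl (fun d j => d.insert (i, j) ([] : List Int)) d)
      PySem.Dict.empty with hinit
  have hik : init.keys = pvGrid ncells := by
    rw [hinit]
    simp only [PySem.Dict.keys, init_items ncells, List.map_map]
    simp [Function.comp_def]
  have hfk := final_keys p2c num ncells hpre init hik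
  have hnd : ((L.foldl (fun d p => d.modify p.1 [] (· ++ [p.2])) init)).keys.Nodup := by
    rw [hfk]; exact pvGrid_nodup ncells
  -- A's final items, cell by cell: cell c carries the particles whose key is c, in index order
  have hitems : (L.foldl (fun d p => d.modify p.1 [] (· ++ [p.2])) init).items
      = (pvGrid ncells).map (fun c => (c,
          (PySem.List.pyRange 0 num 1).filter (fun k => pvKey p2c k == c))) := by
    rw [PySem.Dict.items_eq_map_keys _ hnd ([] : List Int), hfk]
    apply List.map_congr_left
    intro c hc
    congr 1
    rw [PySem.Dict.getD_foldl_modify_append]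
    have hinit0 : init.getD c [] = [] := by
      apply PySem.Dict.getD_of_mem_items
      · rw [init_items ncells]; exact List.mem_map.2 ⟨c, hc, rfl⟩
      · rw [hik]; exact pvGrid_nodup ncells
    rw [hinit0, hL, List.filter_map, List.map_map]
    simp [Function.comp_def]
  rw [hitems]
  -- B's output, cell by cell
  rw [pvGrid]
  simp only [List.map_flatMap, List.map_map]
  apply List.flatMap_congr
  intro i _
  apply List.map_congr_left
  intro j _
  simp only [Function.comp_def]
  rw [filter_clean p2c num ncells hpre (i, j)]

-- ===== VERDICT =====
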